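-- pv_equiv track=rewrite | github.com/ovi-ab888/plate_planner_app | app.py | greedy_sheet_plan
-- ===== SOURCE A (Python) =====
-- from collections import Counter
--
-- def greedy_sheet_plan(demand: dict, layouts: list):
--     """
--     demand: dict size->qty
--     layouts: list of dicts (each plate), values = ups per sheet for that size
--     Returns:
--       - sheet_counts: list of ints per plate
--       - remaining: demand left (should be zeros or small)
--       - produced: dict size->total produced
--       - overage: dict size->overproduction count
--     Greedy = each step choose plate that covers the most still-needed units.
--     """
--     remaining = dict(demand)
--     sheet_counts = [0] * len(layouts)
--
--     def covered_by(layout, remaining):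
--         return sum(min(remaining.get(sz, 0), cnt) for sz, cnt in layout.items())
--
--     # loop until all demands are met or no plate covers anything
--     safe_guard = 10_000  # prevent infinite loop
--     while any(v > 0 for v in remaining.values()) and safe_guard > 0:
--         coverages = [covered_by(layouts[i], remaining) for i in range(len(layouts))]
--         best_i = max(range(len(layouts)), key=lambda i: coverages[i])
--         if coverages[best_i] == 0:
--             break
--         sheet_counts[best_i] += 1
--         for sz, cnt in layouts[best_i].items():
--             if remaining.get(sz, 0) > 0:
--                 remaining[sz] = max(0, remaining[sz] - cnt)
--         safe_guard -= 1
--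
--     produced = Counter()
--     for i, layout in enumerate(layouts):
--         for sz, cnt in layout.items():
--             produced[sz] += cnt * sheet_counts[i]
--
--     all_sizes = set(list(demand.keys()) + list(produced.keys()))
--     overage = {sz: max(0, produced.get(sz, 0) - demand.get(sz, 0)) for sz in all_sizes}
--
--     return sheet_counts, remaining, dict(produced), overage
-- ===== SOURCE B (Python) =====
-- def greedy_sheet_plan(demand: dict, layouts: list):
--     """Same greedy plan as A, but per-layout coverage is maintained incrementally
--     via a size->layouts index instead of being recomputed for every layout each step."""
--     remaining = dict(demand)
--     n = len(layouts)
--     sheet_counts = [0] * n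
--
--     # size -> list of (layout_index, ups) for layouts containing that size
--     pairs = [(sz, (i, cnt)) for i, layout in enumerate(layouts) for sz, cnt in layout.items()]
--     index = {}
--     for sz, iu in pairs:
--         index.setdefault(sz, []).append(iu)
--
--     # coverage cache, computed once
--     cov = [sum(min(remaining.get(sz, 0), cnt) for sz, cnt in layout.items()) for layout in layouts]
--
--     guard = 10_000
--     while guard > 0 and any(v > 0 for v in remaining.values()):
--         best = None  # (index, coverage) of first maximal coverage
--         for i, c in enumerate(cov):
--             if best is None or c > best[1]:
--                 best = (i, c)
--         if best is None or best[1] == 0: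
--             break
--         bi = best[0]
--         sheet_counts[bi] += 1
--         for sz, cnt in layouts[bi].items():
--             r = remaining.get(sz, 0)
--             if r > 0:
--                 r2 = max(0, r - cnt)
--                 remaining[sz] = r2
--                 for j, u in index.get(sz, []):
--                     cov[j] += min(r2, u) - min(r, u)
--         guard -= 1
--
--     produced = {}
--     for i, layout in enumerate(layouts):
--         for sz, cnt in layout.items():
--             produced[sz] = produced.get(sz, 0) + cnt * sheet_counts[i]
--
--     overage = {}
--     for sz in dict.fromkeys(list(demand.keys()) + list(produced.keys())):
--         overage[sz] = max(0, produced.get(sz, 0) - demand.get(sz, 0))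
--
--     return sheet_counts, remaining, produced, overage
-- ===== Notes on version B (the rewrite author's own statement) =====
-- stated objective: faster
-- what changed: Instead of recomputing every layout's coverage of the remaining demand on every greedy step, B builds a size->layouts index once, computes the coverage list once, and after each placement updates only the coverage entries of layouts that share a size with the chosen plate.
-- crash fix: When layouts is empty and some demanded quantity is positive, A raises ValueError (max() over an empty range); B returns the plan with no sheets: ([], remaining=demand, {}, zero overage per demanded size). — e.g. on greedy_sheet_plan([("a", 2)], []): A raises ValueError, B returns ([], [("a", 2)], [], [("a", 0)])
import Mathlib
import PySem

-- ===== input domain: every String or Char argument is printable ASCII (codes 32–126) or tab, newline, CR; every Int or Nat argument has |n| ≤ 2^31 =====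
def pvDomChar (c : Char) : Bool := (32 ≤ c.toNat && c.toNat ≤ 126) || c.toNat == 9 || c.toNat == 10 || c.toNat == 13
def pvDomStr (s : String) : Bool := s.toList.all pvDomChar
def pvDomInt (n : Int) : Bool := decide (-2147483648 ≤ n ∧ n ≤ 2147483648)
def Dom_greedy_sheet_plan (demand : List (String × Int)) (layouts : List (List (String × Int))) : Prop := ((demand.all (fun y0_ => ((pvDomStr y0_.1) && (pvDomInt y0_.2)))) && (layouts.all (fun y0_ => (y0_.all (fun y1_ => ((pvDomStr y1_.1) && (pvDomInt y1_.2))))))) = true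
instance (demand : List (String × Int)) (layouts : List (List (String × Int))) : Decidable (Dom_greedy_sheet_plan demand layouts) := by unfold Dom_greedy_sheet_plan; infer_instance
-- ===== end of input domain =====

-- B replaces A's full per-step recomputation of every layout's coverage by a coverage
-- cache updated incrementally through a size→layouts index (objective: faster).
-- The dicts in the Python return value are compared ignoring order (A iterates a Python
-- set for `overage`; its hash order is not modelled — both ports use first-occurrence order).

-- ===== PORT A =====
-- covered_by(layout, remaining)
def pvCov (L rem : PySem.Dict String Int) : Int :=
  (L.items.map (fun p => min (rem.getD p.1 0) p.2)).sum

-- the body of A's `for sz, cnt in layouts[best_i].items()` update of `remaining`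
def pvRemStep (r : PySem.Dict String Int) (p : String × Int) : PySem.Dict String Int :=
  if 0 < r.getD p.1 0 then r.insert p.1 (max 0 (r.getD p.1 0 - p.2)) else r

-- A's while-loop; the Nat fuel is the `safe_guard = 10_000` counter
def pvAloop (Ls : List (PySem.Dict String Int)) :
    Nat → PySem.Dict String Int → List Int → (PySem.Dict String Int × List Int)
  | 0, rem, sc => (rem, sc)
  | Nat.succ g, rem, sc =>
    if rem.values.any (fun v => decide (0 < v)) then
      let covs := (PySem.List.pyRange 0 (Ls.length : Int) 1).map
        (fun i => pvCov (PySem.List.pyGetD Ls i PySem.Dict.empty) rem)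
      match PySem.List.max? (PySem.List.pyRange 0 (Ls.length : Int) 1)
          (fun i => PySem.List.pyGetD covs i 0) with
      | none => (rem, sc)   -- Python raises ValueError here (layouts == []); excluded by Pre_
      | some bi =>
        if PySem.List.pyGetD covs bi 0 = 0 then (rem, sc)
        else
          pvAloop Ls g ((PySem.List.pyGetD Ls bi PySem.Dict.empty).items.foldl pvRemStep rem)
            (PySem.List.pySetD sc bi (PySem.List.pyGetD sc bi 0 + 1))
    else (rem, sc)

def greedy_sheet_plan (demand : List (String × Int)) (layouts : List (List (String × Int))) :
    List Int × (List (String × Int)) × (List (String × Int)) × (List (String × Int)) :=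
  let dd := PySem.Dict.ofList demand
  let Ls := layouts.map (fun l => PySem.Dict.ofList l)
  let rs := pvAloop Ls 10000 dd (List.replicate layouts.length 0)
  let produced := (PySem.List.enumerate Ls 0).foldl
    (fun d q => q.2.items.foldl
      (fun d p => d.modify p.1 0 (· + p.2 * PySem.List.pyGetD rs.2 q.1 0)) d)
    PySem.Dict.empty
  let overage := (PySem.Set.ofList (dd.keys ++ produced.keys)).foldl
    (fun d sz => d.insert sz (max 0 (produced.getD sz 0 - dd.getD sz 0))) PySem.Dict.empty
  (rs.2, rs.1.items, produced.items, overage.items)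

-- ===== PORT B =====
-- first (index, coverage) pair with maximal coverage, by one pass over the cache
def pvBbest (cov : List Int) : Option (Int × Int) :=
  (PySem.List.enumerate cov 0).foldl
    (fun b p => match b with
      | none => some p
      | some q => if q.2 < p.2 then some p else some q) none

-- one item (sz, cnt) of the chosen layout: update `remaining` and, through the
-- size→layouts index, only the affected entries of the coverage cache
def pvApplyItem (idx : PySem.Dict String (List (Int × Int)))
    (rc : PySem.Dict String Int × List Int) (p : String × Int) :
    PySem.Dict String Int × List Int :=
  let r := rc.1.getD p.1 0
  if 0 < r then
    let r2 := max 0 (r - p.2)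
    (rc.1.insert p.1 r2,
     (idx.getD p.1 []).foldl
       (fun c q => PySem.List.pySetD c q.1 (PySem.List.pyGetD c q.1 0 + (min r2 q.2 - min r q.2)))
       rc.2)
  else rc

def pvBloop (Ls : List (PySem.Dict String Int)) (idx : PySem.Dict String (List (Int × Int))) :
    Nat → PySem.Dict String Int → List Int → List Int → (PySem.Dict String Int × List Int)
  | 0, rem, sc, _ => (rem, sc)
  | Nat.succ g, rem, sc, cov =>
    if rem.values.any (fun v => decide (0 < v)) then
      match pvBbest cov with
      | none => (rem, sc)
      | some b =>
        if b.2 = 0 then (rem, sc)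
        else
          let sc' := PySem.List.pySetD sc b.1 (PySem.List.pyGetD sc b.1 0 + 1)
          let rc := (PySem.List.pyGetD Ls b.1 PySem.Dict.empty).items.foldl (pvApplyItem idx) (rem, cov)
          pvBloop Ls idx g rc.1 sc' rc.2
    else (rem, sc)

def greedy_sheet_plan_alt (demand : List (String × Int)) (layouts : List (List (String × Int))) :
    List Int × (List (String × Int)) × (List (String × Int)) × (List (String × Int)) :=
  let dd := PySem.Dict.ofList demand
  let Ls := layouts.map (fun l => PySem.Dict.ofList l)
  let flat := (PySem.List.enumerate Ls 0).flatMap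
    (fun q => q.2.items.map (fun p => (p.1, (q.1, p.2))))
  let idx := flat.foldl (fun d x => d.modify x.1 [] (· ++ [x.2])) PySem.Dict.empty
  let cov0 := Ls.map (fun L => pvCov L dd)
  let rs := pvBloop Ls idx 10000 dd (List.replicate layouts.length 0) cov0
  let produced := (PySem.List.enumerate Ls 0).foldl
    (fun d q => q.2.items.foldl
      (fun d p => d.insert p.1 (d.getD p.1 0 + p.2 * PySem.List.pyGetD rs.2 q.1 0)) d)
    PySem.Dict.empty
  let overage := (PySem.List.dedup (dd.keys ++ produced.keys)).foldl
    (fun d sz => d.insert sz (max 0 (produced.getD sz 0 - dd.getD sz 0))) PySem.Dict.empty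
  (rs.2, rs.1.items, produced.items, overage.items)

-- ===== PRECONDITION & SPEC =====
-- Pre_ excludes exactly the inputs where A raises ValueError: layouts empty while the
-- demand dict (last value per key) still contains a positive quantity — `max()` on an empty range.
def Pre_greedy_sheet_plan (demand : List (String × Int)) (layouts : List (List (String × Int))) : Prop :=
  layouts ≠ [] ∨ ∀ p ∈ demand, ((demand.reverse.find? (fun q => q.1 == p.1)).map (·.2)).getD 0 ≤ 0
instance (demand : List (String × Int)) (layouts : List (List (String × Int))) : Decidable (Pre_greedy_sheet_plan demand layouts) := by unfold Pre_greedy_sheet_plan; infer_instance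
def pvWitness_greedy_sheet_plan : (List (String × Int)) × (List (List (String × Int))) :=
  ([("a", 1)], [[("a", 2)]])

-- A raises ValueError (`max() arg is an empty sequence`) when layouts == [] and some demanded
-- quantity is still positive; B returns the plan with no sheets there.
def Raises_greedy_sheet_plan (demand : List (String × Int)) (layouts : List (List (String × Int))) : Prop :=
  layouts = [] ∧ ∃ p ∈ demand, 0 < ((demand.reverse.find? (fun q => q.1 == p.1)).map (·.2)).getD 0
instance (demand : List (String × Int)) (layouts : List (List (String × Int))) : Decidable (Raises_greedy_sheet_plan demand layouts) := by unfold Raises_greedy_sheet_plan; infer_instance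
def pvRaiseWitness_greedy_sheet_plan : (List (String × Int)) × (List (List (String × Int))) :=
  ([("a", 2)], [])
def pvRaiseWitnessOut_greedy_sheet_plan :
    List Int × (List (String × Int)) × (List (String × Int)) × (List (String × Int)) :=
  ([], [("a", 2)], [], [("a", 0)])

def Spec_greedy_sheet_plan (demand : List (String × Int)) (layouts : List (List (String × Int))) (out : List Int × (List (String × Int)) × (List (String × Int)) × (List (String × Int))) : Prop := out = greedy_sheet_plan_alt demand layouts
instance (demand : List (String × Int)) (layouts : List (List (String × Int))) (out : List Int × (List (String × Int)) × (List (String × Int)) × (List (String × Int))) : Decidable (Spec_greedy_sheet_plan demand layouts out) := by unfold Spec_greedy_sheet_plan; infer_instance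

-- ===== CLAIM (what is proved, stated in full; the proofs are below) =====
def Claim_equal_greedy_sheet_plan : Prop := ∀ (demand : List (String × Int)) (layouts : List (List (String × Int))), Dom_greedy_sheet_plan demand layouts → Pre_greedy_sheet_plan demand layouts → Spec_greedy_sheet_plan demand layouts (greedy_sheet_plan demand layouts)
def Claim_raises_greedy_sheet_plan : Prop := (∀ (demand : List (String × Int)) (layouts : List (List (String × Int))), Dom_greedy_sheet_plan demand layouts → Raises_greedy_sheet_plan demand layouts → ¬ Pre_greedy_sheet_plan demand layouts) ∧ (Dom_greedy_sheet_plan (pvRaiseWitness_greedy_sheet_plan.1) (pvRaiseWitness_greedy_sheet_plan.2) ∧ Raises_greedy_sheet_plan (pvRaiseWitness_greedy_sheet_plan.1) (pvRaiseWitness_greedy_sheet_plan.2) ∧ greedy_sheet_plan_alt (pvRaiseWitness_greedy_sheet_plan.1) (pvRaiseWitness_greedy_sheet_plan.2) = pvRaiseWitnessOut_greedy_sheet_plan)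

-- ===== LEMMAS AND PROOFS =====

-- helper notions for the proofs
def pvCovD (L : PySem.Dict String Int) (sz : String) (r r2 : Int) : Int :=
  match L.get? sz with
  | some u => min r2 u - min r u
  | none => 0

def pvIdx (Ls : List (PySem.Dict String Int)) : PySem.Dict String (List (Int × Int)) :=
  ((PySem.List.enumerate Ls 0).flatMap
    (fun q => q.2.items.map (fun p => (p.1, (q.1, p.2))))).foldl
    (fun d x => d.modify x.1 [] (· ++ [x.2])) PySem.Dict.empty

-- L1: A's per-step coverage list is the map over the layout dicts
theorem pv_covs_bridge (Ls : List (PySem.Dict String Int)) (rem : PySem.Dict String Int) :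
    (PySem.List.pyRange 0 (Ls.length : Int) 1).map
      (fun i => pvCov (PySem.List.pyGetD Ls i PySem.Dict.empty) rem)
    = Ls.map (fun L => pvCov L rem) := by
  have h : (fun i => pvCov (PySem.List.pyGetD Ls i PySem.Dict.empty) rem)
      = (fun L => pvCov L rem) ∘ (fun i => PySem.List.pyGetD Ls i PySem.Dict.empty) := rfl
  rw [h, ← List.map_map, PySem.List.map_pyGetD_pyRange_zero']

theorem pv_best_fold (covs : List Int) :
    ∀ (l : List (Int × Int)),
      (∀ p ∈ l, PySem.List.pyGetD covs p.1 0 = p.2) →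
      ∀ (a : Option Int),
      l.foldl (fun b p => match b with
        | none => some p
        | some q => if q.2 < p.2 then some p else some q)
        (a.map (fun i => (i, PySem.List.pyGetD covs i 0)))
      = (l.foldl (fun a p => match a with
          | none => some p.1
          | some m => if PySem.List.pyGetD covs m 0 < PySem.List.pyGetD covs p.1 0 then some p.1 else some m)
          a).map (fun i => (i, PySem.List.pyGetD covs i 0)) := by
  intro l
  induction l with
  | nil => intro _ a; rfl
  | cons p t ih =>
    intro hmem a
    have hp : PySem.List.pyGetD covs p.1 0 = p.2 := hmem p (List.mem_cons_self ..)
    have ht : ∀ q ∈ t, PySem.List.pyGetD covs q.1 0 = q.2 :=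
      fun q hq => hmem q (List.mem_cons_of_mem _ hq)
    simp only [List.foldl_cons]
    rw [← ih ht]
    congr 1
    cases a with
    | none =>
      show some p = some (p.1, PySem.List.pyGetD covs p.1 0)
      rw [hp]
    | some m =>
      simp only [Option.map_some]
      rw [hp]
      by_cases h : PySem.List.pyGetD covs m 0 < p.2
      · simp only [if_pos h, Option.map_some]
        show some p = some (p.1, PySem.List.pyGetD covs p.1 0)
        rw [hp]
      · simp [h]

theorem pv_mem_enumerate_getD (covs : List Int) :
    ∀ p ∈ PySem.List.enumerate covs 0, PySem.List.pyGetD covs p.1 0 = p.2 := by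
  intro p hp
  rcases (PySem.List.mem_enumerate_iff covs 0 p).1 hp with ⟨k, hk, rfl⟩
  simp [PySem.List.pyGetD_natCast, List.getElem?_eq_getElem hk]

-- L2: B's single-pass argmax equals A's max over indices
theorem pv_best_eq (covs : List Int) :
    pvBbest covs
    = (PySem.List.max? (PySem.List.pyRange 0 (covs.length : Int) 1)
        (fun i => PySem.List.pyGetD covs i 0)).map
        (fun i => (i, PySem.List.pyGetD covs i 0)) := by
  have hr : PySem.List.pyRange 0 (covs.length : Int) 1
      = (PySem.List.enumerate covs 0).map (·.1) := by
    rw [PySem.List.map_fst_enumerate]; norm_num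
  rw [PySem.List.max?, hr, List.foldl_map, pvBbest]
  have := pv_best_fold covs _ (pv_mem_enumerate_getD covs) none
  simp only [Option.map_none] at this
  rw [this]
  congr 1
  apply PySem.List.foldl_congr_mem
  intro a x _
  cases a <;> rfl


-- L2 in the exact shape the loop proof needs
theorem pv_best_eq' (Ls : List (PySem.Dict String Int)) (rem : PySem.Dict String Int) :
    pvBbest (Ls.map (fun L => pvCov L rem))
    = (PySem.List.max? (PySem.List.pyRange 0 (Ls.length : Int) 1)
        (fun i => PySem.List.pyGetD (Ls.map (fun L => pvCov L rem)) i 0)).map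
        (fun i => (i, PySem.List.pyGetD (Ls.map (fun L => pvCov L rem)) i 0)) := by
  have := pv_best_eq (Ls.map (fun L => pvCov L rem))
  simpa [List.length_map] using this

-- effect of one remaining-update on one layout's coverage sum, over arbitrary item lists
theorem pv_sum_insert (its : List (String × Int)) (rem : PySem.Dict String Int)
    (sz : String) (r2 : Int) :
    (its.map (fun q => min ((rem.insert sz r2).getD q.1 0) q.2)).sum
      = (its.map (fun q => min (rem.getD q.1 0) q.2)).sum
        + ((its.filter (fun q => q.1 == sz)).map
            (fun q => min r2 q.2 - min (rem.getD sz 0) q.2)).sum := by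
  induction its with
  | nil => simp
  | cons q t ih =>
    simp only [List.map_cons, List.sum_cons, List.filter_cons]
    rw [PySem.Dict.getD_insert]
    by_cases h : q.1 = sz
    · rw [if_pos h, h]
      simp only [beq_self_eq_true, ite_true, List.map_cons, List.sum_cons, ih]
      omega
    · rw [if_neg h]
      have hb : (q.1 == sz) = false := by simpa using h
      simp only [hb, Bool.false_eq_true, ite_false, ih]
      omega

-- with unique keys, filtering an item list for one key yields the find? result alone
theorem pv_filter_key_map {β : Type} (its : List (String × Int)) (sz : String)
    (f : String × Int → β) (hnd : (its.map (·.1)).Nodup) :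
    (its.filter (fun q => q.1 == sz)).map f
    = match its.find? (fun q => q.1 == sz) with
      | some q => [f q]
      | none => [] := by
  induction its with
  | nil => rfl
  | cons q t ih =>
    simp only [List.map_cons, List.nodup_cons] at hnd
    by_cases h : q.1 = sz
    · rw [List.filter_cons_of_pos (by simpa using h), List.find?_cons_of_pos (by simpa using h)]
      have hnil : t.filter (fun p => p.1 == sz) = [] := by
        apply List.filter_eq_nil_iff.2
        intro p hp hq
        exact hnd.1 (h ▸ (by simpa using hq) ▸ List.mem_map_of_mem (f := (·.1)) hp)
      simp [hnil]
    · rw [List.filter_cons_of_neg (by simpa using h), List.find?_cons_of_neg (by simpa using h)]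
      exact ih hnd.2

-- L5: coverage of one layout after one remaining-update, with unique keys
theorem pv_cov_insert (L : PySem.Dict String Int) (rem : PySem.Dict String Int)
    (sz : String) (r2 : Int) (hnd : L.keys.Nodup) :
    pvCov L (rem.insert sz r2) = pvCov L rem + pvCovD L sz (rem.getD sz 0) r2 := by
  rw [pvCov, pvCov, pv_sum_insert]
  congr 1
  rw [pv_filter_key_map _ _ _ hnd, pvCovD, PySem.Dict.get?]
  cases hf : L.items.find? (fun p => p.1 == sz) <;> simp

-- L6: what the size→layouts index holds at one key
theorem pv_idx_getD (Ls : List (PySem.Dict String Int)) (sz : String) :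
    (pvIdx Ls).getD sz []
    = (PySem.List.enumerate Ls 0).flatMap
        (fun q => (q.2.items.filter (fun p => p.1 == sz)).map (fun p => (q.1, p.2))) := by
  rw [pvIdx, PySem.Dict.getD_foldl_modify_append]
  simp only [PySem.Dict.getD_empty, List.nil_append]
  rw [List.filter_flatMap, List.map_flatMap]
  congr 1
  funext q
  rw [List.filter_map, List.map_map]
  rfl

theorem pv_take_set (c : List Int) (s : Nat) (v : Int) (hs : s < c.length) :
    (c.set s v).take (s+1) = c.take s ++ [v] := by
  rw [List.set_eq_take_append_cons_drop, if_pos hs, List.take_append]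
  simp [Nat.min_eq_left hs.le, List.length_take]

theorem pv_drop_set (c : List Int) (s : Nat) (v : Int) :
    (c.set s v).drop (s+1) = c.drop (s+1) := by
  simp [List.drop_set]

-- L8: folding the indexed point updates over the coverage cache
theorem pv_cov_step (sz : String) (r r2 : Int) :
    ∀ (Ms : List (PySem.Dict String Int)) (s : Nat) (c : List Int),
    (∀ M ∈ Ms, M.keys.Nodup) → c.length = s + Ms.length →
    ((PySem.List.enumerate Ms (s : Int)).flatMap
        (fun q => (q.2.items.filter (fun p => p.1 == sz)).map (fun p => (q.1, p.2)))).foldl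
      (fun c q => PySem.List.pySetD c q.1 (PySem.List.pyGetD c q.1 0 + (min r2 q.2 - min r q.2))) c
    = c.take s ++ (Ms.zip (c.drop s)).map (fun mu => mu.2 + pvCovD mu.1 sz r r2) := by
  intro Ms
  induction Ms with
  | nil =>
    intro s c _ hlen
    simp only [PySem.List.enumerate_nil, List.flatMap_nil, List.foldl_nil]
    rw [List.take_of_length_le (by simp at hlen; omega)]
    simp
  | cons M Ms ih =>
    intro s c hnd hlen
    have hs : s < c.length := by simp at hlen; omega
    rw [PySem.List.enumerate_cons, List.flatMap_cons, List.foldl_append]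
    have hcast : (s : Int) + 1 = ((s + 1 : Nat) : Int) := by push_cast; ring
    rw [pv_filter_key_map _ _ _ (hnd M (List.mem_cons_self ..))]
    have hget : M.get? sz = (M.items.find? (fun p => p.1 == sz)).map (·.2) := rfl
    cases hf : M.items.find? (fun p => p.1 == sz) with
    | none =>
      simp only [List.map_nil, List.foldl_nil]
      rw [hcast, ih _ _ (fun M h => hnd M (List.mem_cons_of_mem _ h)) (by simp at hlen ⊢; omega)]
      rw [List.drop_eq_getElem_cons hs, List.zip_cons_cons, List.map_cons]
      have hd : pvCovD M sz r r2 = 0 := by rw [pvCovD, hget, hf]; rfl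
      simp only [hd, add_zero]
      rw [List.take_add_one, List.getElem?_eq_getElem hs]
      simp only [Option.toList_some]
      rw [List.append_assoc]
      rfl
    | some u =>
      simp only [List.map_cons, List.map_nil, List.foldl_cons, List.foldl_nil]
      rw [PySem.List.pySetD_natCast, PySem.List.pyGetD_natCast, List.getD_eq_getElem _ _ hs]
      rw [hcast, ih _ _ (fun M h => hnd M (List.mem_cons_of_mem _ h)) (by simp at hlen ⊢; omega)]
      rw [pv_take_set _ _ _ hs, pv_drop_set, List.drop_eq_getElem_cons hs,
        List.zip_cons_cons, List.map_cons]
      have hd : pvCovD M sz r r2 = min r2 u.2 - min r u.2 := by rw [pvCovD, hget, hf]; rfl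
      simp only [hd]
      rw [List.append_assoc]
      rfl

-- L9: the pointwise correction turns old coverages into new ones
theorem pv_zip_map (Ls : List (PySem.Dict String Int)) (rem : PySem.Dict String Int)
    (sz : String) (r2 : Int) (hnd : ∀ L ∈ Ls, L.keys.Nodup) :
    (Ls.zip (Ls.map (fun L => pvCov L rem))).map
        (fun mu => mu.2 + pvCovD mu.1 sz (rem.getD sz 0) r2)
    = Ls.map (fun L => pvCov L (rem.insert sz r2)) := by
  induction Ls with
  | nil => rfl
  | cons L t ih =>
    simp only [List.map_cons, List.zip_cons_cons]
    rw [ih (fun M h => hnd M (List.mem_cons_of_mem _ h))]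
    rw [pv_cov_insert L rem sz r2 (hnd L (List.mem_cons_self ..))]

-- L10: one item of the chosen layout keeps the cache in sync
theorem pv_apply_item (Ls : List (PySem.Dict String Int)) (rem : PySem.Dict String Int)
    (p : String × Int) (hnd : ∀ L ∈ Ls, L.keys.Nodup) :
    pvApplyItem (pvIdx Ls) (rem, Ls.map (fun L => pvCov L rem)) p
    = (pvRemStep rem p, Ls.map (fun L => pvCov L (pvRemStep rem p))) := by
  rw [pvApplyItem, pvRemStep]
  by_cases h : 0 < rem.getD p.1 0
  · rw [if_pos h, if_pos h]
    simp only
    rw [pv_idx_getD]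
    have hstep := pv_cov_step p.1 (rem.getD p.1 0) (max 0 (rem.getD p.1 0 - p.2)) Ls 0
      (Ls.map (fun L => pvCov L rem)) hnd (by simp)
    simp only [Nat.cast_zero, List.take_zero, List.drop_zero, List.nil_append] at hstep
    rw [hstep, pv_zip_map Ls rem p.1 _ hnd]
  · rw [if_neg h, if_neg h]

-- L11: the whole per-placement update loop
theorem pv_items_fold (Ls : List (PySem.Dict String Int)) (hnd : ∀ L ∈ Ls, L.keys.Nodup) :
    ∀ (its : List (String × Int)) (rem : PySem.Dict String Int),
    its.foldl (pvApplyItem (pvIdx Ls)) (rem, Ls.map (fun L => pvCov L rem))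
    = (its.foldl pvRemStep rem, Ls.map (fun L => pvCov L (its.foldl pvRemStep rem))) := by
  intro its
  induction its with
  | nil => intro rem; rfl
  | cons p t ih =>
    intro rem
    rw [List.foldl_cons, List.foldl_cons, pv_apply_item Ls rem p hnd, ih]

-- L12: the two loops agree when the cache is correct
theorem pv_loop_eq (Ls : List (PySem.Dict String Int)) (hnd : ∀ L ∈ Ls, L.keys.Nodup) :
    ∀ (g : Nat) (rem : PySem.Dict String Int) (sc : List Int),
    pvAloop Ls g rem sc = pvBloop Ls (pvIdx Ls) g rem sc (Ls.map (fun L => pvCov L rem)) := by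
  intro g
  induction g with
  | zero => intro rem sc; rfl
  | succ g ih =>
    intro rem sc
    rw [pvAloop, pvBloop]
    by_cases hany : rem.values.any (fun v => decide (0 < v))
    · simp only [hany, if_true]
      rw [pv_covs_bridge, pv_best_eq']
      cases hb : PySem.List.max? (PySem.List.pyRange 0 (Ls.length : Int) 1)
          (fun i => PySem.List.pyGetD (Ls.map (fun L => pvCov L rem)) i 0) with
      | none => rfl
      | some bi =>
        simp only [Option.map_some]
        by_cases hz : PySem.List.pyGetD (Ls.map (fun L => pvCov L rem)) bi 0 = 0
        · simp [hz]
        · rw [if_neg hz, if_neg hz]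
          rw [pv_items_fold Ls hnd _ rem]
          rw [ih]
    · simp [hany]

theorem pv_main : ∀ (demand : List (String × Int)) (layouts : List (List (String × Int))),
    greedy_sheet_plan demand layouts = greedy_sheet_plan_alt demand layouts := by
  intro demand layouts
  have hnd : ∀ L ∈ layouts.map (fun l => PySem.Dict.ofList l), L.keys.Nodup := by
    intro L hL
    rcases List.mem_map.1 hL with ⟨l, _, rfl⟩
    exact PySem.Dict.nodup_keys_ofList l
  simp only [greedy_sheet_plan, greedy_sheet_plan_alt]
  rw [pv_loop_eq _ hnd]
  simp only [PySem.List.dedup_eq_ofList]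
  rfl

-- ===== VERDICT (by name: the statement is the Claim_ definition above) =====
theorem greedy_sheet_plan_spec : Claim_equal_greedy_sheet_plan := by
  intro demand layouts _ _
  unfold Spec_greedy_sheet_plan
  exact pv_main demand layouts

@[simp]
theorem greedy_sheet_plan_raises : Claim_raises_greedy_sheet_plan := by
  unfold Claim_raises_greedy_sheet_plan
  constructor
  · rintro demand layouts _ ⟨hl, p, hp, hpos⟩ hpre
    rcases hpre with h | h
    · exact h hl
    · exact absurd (h p hp) (by omega)
  · exact ⟨by decide, by decide, by decide⟩
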